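-- pv_equiv track=rewrite | github.com/Ananta-dot/misr_new | misr_seek_pkl.py | motif_ladder
-- ===== SOURCE A (Python) =====
-- from typing import Dict, List, Tuple
--
-- Seq = List[int]
--
-- def motif_ladder(n: int) -> Seq:
--     out=[]
--     a, b = 1, 2
--     while len(out) < 2*n:
--         out += [a, b if b<=n else a]
--         a += 1; b += 1
--         if a > n: a = n
--         if b > n: b = n
--     cnt = {i:0 for i in range(1,n+1)}; fixed=[]
--     for x in out:
--         if cnt[x] < 2:
--             fixed.append(x); cnt[x]+=1
--     for i in range(1,n+1):
--         while cnt[i] < 2: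
--             fixed.append(i); cnt[i]+=1
--     return fixed[:2*n]
-- ===== SOURCE B (Python) =====
-- from typing import List
--
-- Seq = List[int]
--
-- def motif_ladder(n: int) -> Seq:
--     if n < 1:
--         return []
--     return [1] + [x for i in range(2, n + 1) for x in (i, i)] + [1]
-- ===== Notes on version B (the rewrite author's own statement) =====
-- stated objective: simpler
-- what changed: B returns the closed-form pattern [1] + [i,i for i in 2..n] + [1] built directly by one comprehension, discarding A's clamped two-counter ladder loop, the dict-based deduplication pass, the fill pass and the final slice.
import Mathlib
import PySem

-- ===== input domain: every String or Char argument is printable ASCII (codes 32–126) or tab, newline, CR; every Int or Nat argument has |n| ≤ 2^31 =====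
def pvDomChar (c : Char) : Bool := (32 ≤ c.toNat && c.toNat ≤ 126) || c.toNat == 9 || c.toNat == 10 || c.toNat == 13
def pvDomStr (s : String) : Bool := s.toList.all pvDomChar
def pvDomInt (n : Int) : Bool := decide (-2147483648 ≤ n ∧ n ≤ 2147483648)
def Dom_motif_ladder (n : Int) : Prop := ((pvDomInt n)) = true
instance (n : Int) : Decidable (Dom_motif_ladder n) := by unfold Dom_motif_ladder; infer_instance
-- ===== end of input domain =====

-- B replaces A's ladder loop + dict dedup/fill passes by directly emitting the pattern [1,2,2,…,n,n,1]; same return value, no mutation involved.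

-- ===== PORT A =====
-- 'while len(out) < 2*n', with structural fuel (2*n).toNat: each iteration appends two
-- elements, so at most (2*n).toNat iterations run and the fuel is never exhausted
def pvLoopA (n : Int) (fuel : Nat) (out : List Int) (a b : Int) : List Int :=
  match fuel with
  | 0 => out
  | f + 1 =>
    if ((out.length : Int)) < 2 * n then
      pvLoopA n f (out ++ [a, if b ≤ n then b else a])
        (if a + 1 > n then n else a + 1) (if b + 1 > n then n else b + 1)
    else out

-- the body of the first for-loop: 'if cnt[x] < 2: fixed.append(x); cnt[x] += 1'
-- (cnt[x] read with getD _ 0: every x in out lies in 1..n, so the key is always present)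
def pvStep1 (st : List Int × PySem.Dict Int Int) (x : Int) : List Int × PySem.Dict Int Int :=
  if st.2.getD x 0 < 2 then (st.1 ++ [x], st.2.insert x (st.2.getD x 0 + 1)) else st

-- the inner 'while cnt[i] < 2' loop of the fill pass, with structural fuel 2: every count
-- starts at 0 and only ever grows by 1, so the loop body runs at most twice
def pvFillA (fuel : Nat) (i : Int) (st : List Int × PySem.Dict Int Int) : List Int × PySem.Dict Int Int :=
  match fuel with
  | 0 => st
  | f + 1 =>
    if st.2.getD i 0 < 2 then
      pvFillA f i (st.1 ++ [i], st.2.insert i (st.2.getD i 0 + 1))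
    else st

def motif_ladder (n : Int) : List Int :=
  let out := pvLoopA n (2 * n).toNat [] 1 2
  let cnt := (PySem.List.pyRange 1 (n + 1) 1).foldl (fun d i => d.insert i 0)
    (PySem.Dict.empty : PySem.Dict Int Int)
  let st := out.foldl pvStep1 (([] : List Int), cnt)
  let st2 := (PySem.List.pyRange 1 (n + 1) 1).foldl (fun st i => pvFillA 2 i st) st
  PySem.List.slice st2.1 none (some (2 * n))

-- ===== PORT B =====
def motif_ladder_alt (n : Int) : List Int :=
  if n < 1 then []
  else [1] ++ (PySem.List.pyRange 2 (n + 1) 1).flatMap (fun i => [i, i]) ++ [1]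

-- ===== PRECONDITION & SPEC =====
def Spec_motif_ladder (n : Int) (out : List Int) : Prop := out = motif_ladder_alt n
instance (n : Int) (out : List Int) : Decidable (Spec_motif_ladder n out) := by unfold Spec_motif_ladder; infer_instance

-- ===== CLAIM (what is proved, stated in full; the proofs are below) =====
def Claim_equal_motif_ladder : Prop := ∀ (n : Int), Dom_motif_ladder n → Spec_motif_ladder n (motif_ladder n)

-- ===== LEMMAS AND PROOFS =====

-- the values generated by A's while loop from state (a, b); fuel = remaining iterations
def pvGen (n : Int) (fuel : Nat) (a b : Int) : List Int :=
  match fuel with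
  | 0 => []
  | f + 1 => a :: (if b ≤ n then b else a) ::
      pvGen n f (if a + 1 > n then n else a + 1) (if b + 1 > n then n else b + 1)

theorem pvStep1_add (fx : List Int) (c : PySem.Dict Int Int) (x v : Int)
    (hv : c.getD x 0 = v) (h : v < 2) :
    pvStep1 (fx, c) x = (fx ++ [x], c.insert x (v + 1)) := by
  simp [pvStep1, hv, h]

theorem pvStep1_skip (fx : List Int) (c : PySem.Dict Int Int) (x : Int)
    (h : ¬ c.getD x 0 < 2) : pvStep1 (fx, c) x = (fx, c) := by
  simp [pvStep1, h]

theorem pvLoopA_eq_gen (n : Int) : ∀ (k : Nat) (F : Nat) (out : List Int) (a b : Int),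
    2 * n = (out.length : Int) + 2 * (k : Int) → k ≤ F →
    pvLoopA n F out a b = out ++ pvGen n k a b := by
  intro k
  induction k with
  | zero =>
    intro F out a b h _
    cases F with
    | zero => simp [pvLoopA, pvGen]
    | succ f => rw [pvLoopA, if_neg (by omega)]; simp [pvGen]
  | succ f ih =>
    intro F out a b h hF
    obtain ⟨F', rfl⟩ : ∃ F', F = F' + 1 := ⟨F - 1, by omega⟩
    rw [pvLoopA, if_pos (by push_cast at h ⊢; omega)]
    rw [ih F' _ _ _ (by simp only [List.length_append, List.length_cons, List.length_nil]; push_cast at h ⊢; omega) (by omega)]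
    simp [pvGen]

theorem pvGen_closed (n : Int) : ∀ (k : Nat) (a : Int), 1 ≤ a → a + k = n →
    pvGen n (k + 1) a (if a + 1 > n then n else a + 1) =
      a :: (((PySem.List.pyRange (a + 1) (n + 1) 1).flatMap (fun i => [i, i])) ++ [n]) := by
  intro k
  induction k with
  | zero =>
    intro a ha hk
    have hn : a = n := by push_cast at hk; omega
    subst hn
    rw [PySem.List.pyRange_one_eq_nil (by omega)]
    rw [if_pos (by omega : a + 1 > a)]
    simp [pvGen]
  | succ f ih =>
    intro a ha hk
    have hlt : a < n := by push_cast at hk; omega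
    have hb : ¬ a + 1 > n := by omega
    rw [if_neg hb]
    show (a :: (if a + 1 ≤ n then a + 1 else a) :: pvGen n (f + 1)
        (if a + 1 > n then n else a + 1) (if a + 1 + 1 > n then n else a + 1 + 1)) = _
    rw [if_pos (by omega : a + 1 ≤ n), if_neg hb]
    rw [ih (a + 1) (by omega) (by push_cast at hk ⊢; omega)]
    rw [PySem.List.pyRange_one_cons (by omega : a + 1 < n + 1)]
    simp

-- the initial counter dict: every lookup with default 0 is 0
theorem pvCnt0 (l : List Int) : ∀ (d : PySem.Dict Int Int), (∀ j, d.getD j 0 = 0) →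
    ∀ j, ((l.foldl (fun d i => d.insert i 0) d).getD j 0) = 0 := by
  induction l with
  | nil => intro d hd j; exact hd j
  | cons x xs ih =>
    intro d hd j
    simp only [List.foldl_cons]
    refine ih _ ?_ j
    intro j'
    by_cases hj : j' = x
    · subst hj; rw [PySem.Dict.getD_insert_self]
    · rw [PySem.Dict.getD_insert_of_ne _ _ _ hj]; exact hd j'

-- A's dedup pass over the doubled segment [a,a,a+1,a+1,…,n,n]
theorem pvPass1_pairs (n : Int) : ∀ (k : Nat) (a : Int), a + k = n + 1 →
    ∀ (fx : List Int) (c : PySem.Dict Int Int), (∀ j, a ≤ j → c.getD j 0 = 0) →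
    ∃ c', (((PySem.List.pyRange a (n + 1) 1).flatMap (fun i => [i, i])).foldl pvStep1 (fx, c))
      = (fx ++ (PySem.List.pyRange a (n + 1) 1).flatMap (fun i => [i, i]), c')
      ∧ (∀ j, c'.getD j 0 = if a ≤ j ∧ j ≤ n then 2 else c.getD j 0) := by
  intro k
  induction k with
  | zero =>
    intro a hk fx c hc
    rw [PySem.List.pyRange_one_eq_nil (by push_cast at hk; omega)]
    refine ⟨c, by simp, ?_⟩
    intro j
    rw [if_neg (by push_cast at hk; omega)]
  | succ f ih =>
    intro a hk fx c hc
    have ha : a < n + 1 := by push_cast at hk; omega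
    obtain ⟨c', h1, h2⟩ := ih (a + 1) (by push_cast at hk ⊢; omega) (fx ++ [a] ++ [a])
      (c.insert a 2) (by
        intro j hj
        rw [PySem.Dict.getD_insert_of_ne _ _ _ (by omega : j ≠ a)]
        exact hc j (by omega))
    refine ⟨c', ?_, ?_⟩
    · rw [PySem.List.pyRange_one_cons ha]
      simp only [List.flatMap_cons, List.cons_append, List.nil_append, List.foldl_cons]
      rw [pvStep1_add fx c a 0 (hc a le_rfl) (by omega)]
      rw [pvStep1_add (fx ++ [a]) _ a (0 + 1) (by rw [PySem.Dict.getD_insert_self]) (by omega)]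
      rw [PySem.Dict.insert_insert_self, show ((0 : Int) + 1 + 1) = 2 by norm_num, h1]
      simp
    · intro j
      rw [h2 j]
      by_cases hja : j = a
      · subst hja
        rw [if_neg (by omega), if_pos (by omega), PySem.Dict.getD_insert_self]
      · by_cases hr : a + 1 ≤ j ∧ j ≤ n
        · rw [if_pos hr, if_pos (by omega)]
        · rw [if_neg hr, if_neg (by omega), PySem.Dict.getD_insert_of_ne _ _ _ hja]

-- unfolding facts about the fill while-loop at its call-site fuel 2
theorem pvFillA_done (i : Int) (st : List Int × PySem.Dict Int Int) (h : ¬ st.2.getD i 0 < 2) :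
    pvFillA 2 i st = st := by
  rw [pvFillA, if_neg h]

theorem pvFillA_one (i : Int) (fx : List Int) (c : PySem.Dict Int Int) (h : c.getD i 0 = 1) :
    pvFillA 2 i (fx, c) = (fx ++ [i], c.insert i 2) := by
  rw [pvFillA, if_pos (by simp [h])]
  simp only [h]
  rw [show (1 : Int) + 1 = 2 by norm_num]
  rw [pvFillA, if_neg (by simp [PySem.Dict.getD_insert_self])]

-- A's fill pass is the identity on a range whose counts are all 2
theorem pvPass2_noop (n : Int) : ∀ (k : Nat) (a : Int), a + k = n + 1 →
    ∀ (fx : List Int) (c : PySem.Dict Int Int), (∀ j, a ≤ j → j ≤ n → c.getD j 0 = 2) →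
    (PySem.List.pyRange a (n + 1) 1).foldl (fun st i => pvFillA 2 i st) (fx, c) = (fx, c) := by
  intro k
  induction k with
  | zero =>
    intro a hk fx c hc
    rw [PySem.List.pyRange_one_eq_nil (by push_cast at hk; omega)]
    simp
  | succ f ih =>
    intro a hk fx c hc
    rw [PySem.List.pyRange_one_cons (by push_cast at hk; omega)]
    simp only [List.foldl_cons]
    rw [pvFillA_done a (fx, c) (by rw [hc a le_rfl (by push_cast at hk; omega)]; omega)]
    exact ih (a + 1) (by push_cast at hk ⊢; omega) fx c (fun j hj1 hj2 => hc j (by omega) hj2)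

-- B on n ≥ 1, as a cons
theorem pvB_closed (n : Int) (h : ¬ n < 1) :
    motif_ladder_alt n = 1 :: ((PySem.List.pyRange 2 (n + 1) 1).flatMap (fun i => [i, i]) ++ [1]) := by
  rw [motif_ladder_alt, if_neg h]
  simp

theorem pv_main (n : Int) : motif_ladder n = motif_ladder_alt n := by
  by_cases hn : n < 1
  · -- n ≤ 0: A's loop body never runs, all ranges are empty, the slice of [] is []
    rw [motif_ladder, motif_ladder_alt, if_pos hn]
    rw [show (2 * n).toNat = 0 by omega]
    rw [PySem.List.pyRange_one_eq_nil (by omega)]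
    simp [pvLoopA, PySem.List.slice]
  · -- n ≥ 1: A's while loop produces 1 :: pairs(2..n) ++ [n]
    have hn1 : 1 ≤ n := by omega
    have hout : pvLoopA n (2 * n).toNat [] 1 2 =
        1 :: ((PySem.List.pyRange 2 (n + 1) 1).flatMap (fun i => [i, i]) ++ [n]) := by
      have hfuel : 2 * n = ((([] : List Int)).length : Int) + 2 * (((n - 1).toNat + 1 : Nat) : Int) := by
        simp only [List.length_nil, Nat.cast_zero]; push_cast; omega
      rw [pvLoopA_eq_gen n ((n - 1).toNat + 1) (2 * n).toNat [] 1 2 hfuel (by omega)]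
      by_cases h1 : n = 1
      · subst h1; rfl
      · have h2 : (if (1 : Int) + 1 > n then n else 1 + 1) = 2 := by
          rw [if_neg (by omega)]; norm_num
        have hg := pvGen_closed n (n - 1).toNat 1 le_rfl (by omega)
        rw [h2] at hg
        rw [hg]
        simp
    rw [motif_ladder]
    simp only [hout]
    -- the initial counter
    set cnt0 := (PySem.List.pyRange 1 (n + 1) 1).foldl (fun d i => d.insert i 0)
      (PySem.Dict.empty : PySem.Dict Int Int) with hcnt0
    have hc0 : ∀ j, cnt0.getD j 0 = 0 := by
      intro j
      exact pvCnt0 _ _ (fun j => rfl) j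
    -- the dedup pass
    obtain ⟨c2, hc2a, hc2b⟩ := pvPass1_pairs n (n - 1).toNat 2 (by omega) [1]
      (cnt0.insert 1 1) (by
        intro j hj
        rw [PySem.Dict.getD_insert_of_ne _ _ _ (by omega : j ≠ 1)]
        exact hc0 j)
    have hc2spec : ∀ j, c2.getD j 0 =
        if 2 ≤ j ∧ j ≤ n then 2 else if j = 1 then 1 else 0 := by
      intro j
      rw [hc2b j]
      by_cases hr : 2 ≤ j ∧ j ≤ n
      · rw [if_pos hr, if_pos hr]
      · rw [if_neg hr, if_neg hr]
        by_cases hj1 : j = 1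
        · subst hj1; rw [if_pos rfl, PySem.Dict.getD_insert_self]
        · rw [if_neg hj1, PySem.Dict.getD_insert_of_ne _ _ _ hj1]; exact hc0 j
    by_cases h1 : n = 1
    · -- n = 1: out = [1,1]; the dedup pass keeps both 1s, the fill pass does nothing
      subst h1
      have hp1 : ((1 : Int) :: ((PySem.List.pyRange 2 (1 + 1) 1).flatMap (fun i => [i, i]) ++ [1])).foldl
          pvStep1 (([] : List Int), cnt0) = ([1, 1], cnt0.insert 1 2) := by
        rw [PySem.List.pyRange_one_eq_nil (by omega)]
        simp only [List.flatMap_nil, List.nil_append, List.foldl_cons, List.foldl_nil]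
        rw [pvStep1_add [] cnt0 1 0 (hc0 1) (by omega)]
        rw [pvStep1_add ([] ++ [1]) _ 1 (0 + 1) (by rw [PySem.Dict.getD_insert_self]) (by omega)]
        rw [PySem.Dict.insert_insert_self]
        norm_num
      rw [hp1]
      have hp2 : (PySem.List.pyRange 1 (1 + 1) 1).foldl (fun st i => pvFillA 2 i st)
          ([(1 : Int), 1], cnt0.insert 1 2) = ([1, 1], cnt0.insert 1 2) := by
        rw [PySem.List.pyRange_one_cons (by omega : (1 : Int) < 1 + 1), PySem.List.pyRange_one_eq_nil (by omega)]
        simp only [List.foldl_cons, List.foldl_nil]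
        exact pvFillA_done 1 _ (by rw [PySem.Dict.getD_insert_self]; omega)
      rw [hp2]
      rw [show (2 : Int) * 1 = ((2 : Nat) : Int) by norm_num, PySem.List.slice_to_natCast]
      rw [pvB_closed 1 hn, PySem.List.pyRange_one_eq_nil (by omega)]
      rfl
    · -- n ≥ 2
      have hn2 : 2 ≤ n := by omega
      have hpass1 :
          ((1 : Int) :: ((PySem.List.pyRange 2 (n + 1) 1).flatMap (fun i => [i, i]) ++ [n])).foldl
            pvStep1 (([] : List Int), cnt0)
          = (1 :: (PySem.List.pyRange 2 (n + 1) 1).flatMap (fun i => [i, i]), c2) := by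
        rw [List.foldl_cons, pvStep1_add [] cnt0 1 0 (hc0 1) (by omega)]
        rw [show (([] : List Int) ++ [1], cnt0.insert 1 (0 + 1)) = ([1], cnt0.insert 1 1) by norm_num]
        rw [List.foldl_append, hc2a]
        simp only [List.foldl_cons, List.foldl_nil]
        rw [pvStep1_skip _ _ _ (by rw [hc2spec n, if_pos (by omega)]; omega)]
        simp
      rw [hpass1]
      -- fill pass: i = 1 appends one 1, the rest is a no-op
      have hfill1 : pvFillA 2 1 (1 :: (PySem.List.pyRange 2 (n + 1) 1).flatMap (fun i => [i, i]), c2)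
          = (1 :: ((PySem.List.pyRange 2 (n + 1) 1).flatMap (fun i => [i, i]) ++ [1]), c2.insert 1 2) := by
        rw [pvFillA_one 1 _ _ (by rw [hc2spec 1, if_neg (by omega), if_pos rfl])]
        simp
      have hpass2 :
          (PySem.List.pyRange 1 (n + 1) 1).foldl (fun st i => pvFillA 2 i st)
            (1 :: (PySem.List.pyRange 2 (n + 1) 1).flatMap (fun i => [i, i]), c2)
          = (1 :: ((PySem.List.pyRange 2 (n + 1) 1).flatMap (fun i => [i, i]) ++ [1]), c2.insert 1 2) := by
        rw [PySem.List.pyRange_one_cons (by omega : (1 : Int) < n + 1), List.foldl_cons, hfill1]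
        exact pvPass2_noop n (n - 1).toNat 2 (by omega) _ _ (by
          intro j hj1 hj2
          rw [PySem.Dict.getD_insert_of_ne _ _ _ (by omega : j ≠ 1), hc2spec j, if_pos ⟨hj1, hj2⟩])
      rw [hpass2]
      -- the final slice keeps everything: the list has length exactly 2n
      have hlen : ((1 : Int) :: ((PySem.List.pyRange 2 (n + 1) 1).flatMap (fun i => [i, i]) ++ [1])).length
          = (2 * n).toNat := by
        simp [PySem.List.length_pyRange_one]
        omega
      rw [show (2 * n) = (((2 * n).toNat : Nat) : Int) by omega, PySem.List.slice_to_natCast,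
        List.take_of_length_le (by rw [hlen])]
      rw [pvB_closed n hn]

-- ===== VERDICT (by name: the statement is the Claim_ definition above) =====
theorem motif_ladder_spec : Claim_equal_motif_ladder := by
  intro n _
  exact pv_main n
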